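-- pv_equiv track=rewrite | github.com/Aditya239233/MDP | algorithm/planner/translate.py | pos_to_neg_to_pos
-- ===== SOURCE A (Python) =====
-- def pos_to_neg_to_pos(section):
--     pos = False
--     neg_index = 1
--
--     if not (section[0][3] >= 0):
--         return False
--
--     while neg_index < len(section) and section[neg_index][3] >= 0:
--         neg_index += 1
--
--     if neg_index == len(section):
--         return False
--
--     for i in range(neg_index, len(section)):
--         if section[i][3] >= 0:
--             pos = True
--             break
--
--     return pos
-- ===== SOURCE B (Python) =====
-- def pos_to_neg_to_pos(section):
--     # Single pass counting runs of equal sign of the 4th field: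
--     # pattern holds iff the first element is non-negative and there are
--     # at least 3 sign runs (non-neg, neg, non-neg, ...).
--     if section[0][3] < 0:
--         return False
--     prev = True
--     runs = 1
--     for x in section[1:]:
--         k = x[3] >= 0
--         if k != prev:
--             prev = k
--             runs += 1
--             if runs >= 3:
--                 return True
--     return False
-- ===== Notes on version B (the rewrite author's own statement) =====
-- stated objective: simpler
-- what changed: Replaced A's two successive scans with index bookkeeping (a while loop finding the first negative index, then a for loop scanning from it) by a single pass that counts runs of equal sign of the 4th field and returns True as soon as 3 runs are seen.
-- outside the precondition, e.g. on pos_to_neg_to_pos([]): A raises IndexError, B raises IndexError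
import Mathlib
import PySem

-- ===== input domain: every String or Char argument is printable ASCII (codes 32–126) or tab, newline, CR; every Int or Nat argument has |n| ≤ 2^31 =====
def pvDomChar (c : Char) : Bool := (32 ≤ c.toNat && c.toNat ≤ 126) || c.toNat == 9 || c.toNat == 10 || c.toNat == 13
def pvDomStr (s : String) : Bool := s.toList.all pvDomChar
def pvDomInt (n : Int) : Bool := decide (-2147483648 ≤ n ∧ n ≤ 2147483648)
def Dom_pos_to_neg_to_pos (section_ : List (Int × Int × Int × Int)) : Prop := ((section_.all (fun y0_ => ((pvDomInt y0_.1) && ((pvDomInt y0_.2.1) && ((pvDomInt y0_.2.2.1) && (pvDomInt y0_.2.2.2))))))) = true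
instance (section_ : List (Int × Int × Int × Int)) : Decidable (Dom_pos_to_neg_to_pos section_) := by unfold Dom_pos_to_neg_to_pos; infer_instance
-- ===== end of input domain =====

-- B replaces A's two index-based scans by a single pass counting runs of equal sign (simpler).
-- Pre_ excludes the empty list, on which A (and B) raise IndexError.


-- ===== PORT A =====
-- A's while loop: advance neg_index while section[neg_index][3] >= 0
def pvWhileA : List (Int × Int × Int × Int) → Nat → Nat
  | [], i => i
  | x :: rest, i => if x.2.2.2 ≥ 0 then pvWhileA rest (i + 1) else i

-- A's for loop over section[neg_index:]: pos = True and break at first field >= 0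
def pvForA : List (Int × Int × Int × Int) → Bool
  | [] => false
  | x :: rest => if x.2.2.2 ≥ 0 then true else pvForA rest

def pos_to_neg_to_pos (section_ : List (Int × Int × Int × Int)) : Bool :=
  match section_ with
  | [] => false   -- A raises IndexError here; outside Pre_
  | h :: t =>
    if ¬ (h.2.2.2 ≥ 0) then false
    else
      let neg_index := pvWhileA t 1
      if neg_index = section_.length then false
      else pvForA (section_.drop neg_index)

-- ===== PORT B =====
-- B's single for loop: count runs of equal sign, return True once 3 runs are seen
def pvRunsB : List (Int × Int × Int × Int) → Bool → Nat → Bool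
  | [], _, _ => false
  | x :: rest, prev, runs =>
    let k := decide (x.2.2.2 ≥ 0)
    if k ≠ prev then
      (if runs + 1 ≥ 3 then true else pvRunsB rest k (runs + 1))
    else pvRunsB rest prev runs

def pos_to_neg_to_pos_alt (section_ : List (Int × Int × Int × Int)) : Bool :=
  match section_ with
  | [] => false   -- B raises IndexError here; outside Pre_
  | h :: t =>
    if h.2.2.2 < 0 then false
    else pvRunsB t true 1

-- ===== PRECONDITION & SPEC =====
-- Pre_ excludes exactly the empty list, on which A raises IndexError (section[0]).
def Pre_pos_to_neg_to_pos (section_ : List (Int × Int × Int × Int)) : Prop := section_ ≠ []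
instance (section_ : List (Int × Int × Int × Int)) : Decidable (Pre_pos_to_neg_to_pos section_) := by unfold Pre_pos_to_neg_to_pos; infer_instance
def pvWitness_pos_to_neg_to_pos : (List (Int × Int × Int × Int)) := [(0, 0, 0, 1), (0, 0, 0, -2), (0, 0, 0, 3)]

def Spec_pos_to_neg_to_pos (section_ : List (Int × Int × Int × Int)) (out : Bool) : Prop := out = pos_to_neg_to_pos_alt section_
instance (section_ : List (Int × Int × Int × Int)) (out : Bool) : Decidable (Spec_pos_to_neg_to_pos section_ out) := by unfold Spec_pos_to_neg_to_pos; infer_instance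

-- ===== CLAIM =====
def Claim_equal_pos_to_neg_to_pos : Prop := ∀ (section_ : List (Int × Int × Int × Int)), Dom_pos_to_neg_to_pos section_ → Pre_pos_to_neg_to_pos section_ → Spec_pos_to_neg_to_pos section_ (pos_to_neg_to_pos section_)

-- ===== LEMMAS AND PROOFS =====

theorem pvWhileA_ge (t : List (Int × Int × Int × Int)) (i : Nat) : i ≤ pvWhileA t i := by
  induction t generalizing i with
  | nil => simp [pvWhileA]
  | cons x r ih =>
    simp only [pvWhileA]
    split
    · exact Nat.le_trans (Nat.le_succ i) (ih (i + 1))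
    · exact Nat.le_refl i

theorem pvWhileA_succ (t : List (Int × Int × Int × Int)) (i : Nat) :
    pvWhileA t (i + 1) = pvWhileA t i + 1 := by
  induction t generalizing i with
  | nil => simp [pvWhileA]
  | cons x r ih =>
    simp only [pvWhileA]
    split
    · exact ih (i + 1)
    · rfl

-- the tail of B's loop after the first sign change computes A's for loop
theorem pvRunsB_two (v : List (Int × Int × Int × Int)) : pvRunsB v false 2 = pvForA v := by
  induction v with
  | nil => simp [pvRunsB, pvForA]
  | cons x r ih =>
    simp only [pvRunsB, pvForA]
    by_cases h : x.2.2.2 ≥ 0 <;> simp [h, ih]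

-- core: on the tail (head already known non-negative) A's while+for equal B's run counter
theorem core (t : List (Int × Int × Int × Int)) :
    (if pvWhileA t 1 = t.length + 1 then false
     else pvForA (t.drop (pvWhileA t 1 - 1))) = pvRunsB t true 1 := by
  induction t with
  | nil => simp [pvWhileA, pvRunsB]
  | cons x r ih =>
    by_cases h : x.2.2.2 ≥ 0
    · have hw : pvWhileA (x :: r) 1 = pvWhileA r 1 + 1 := by
        simp [pvWhileA, h, pvWhileA_succ]
      have hge : 1 ≤ pvWhileA r 1 := pvWhileA_ge r 1
      have hrb : pvRunsB (x :: r) true 1 = pvRunsB r true 1 := by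
        simp [pvRunsB, h]
      rw [hrb, ← ih, hw]
      have hdrop : (x :: r).drop (pvWhileA r 1 + 1 - 1) = r.drop (pvWhileA r 1 - 1) := by
        obtain ⟨m, hm⟩ : ∃ m, pvWhileA r 1 = m + 1 := ⟨pvWhileA r 1 - 1, by omega⟩
        simp [hm]
      rw [hdrop]
      simp only [List.length_cons]
      have hiff : (pvWhileA r 1 + 1 = r.length + 1 + 1) ↔ (pvWhileA r 1 = r.length + 1) := by omega
      simp [hiff]
    · have hw : pvWhileA (x :: r) 1 = 1 := by simp [pvWhileA, h]
      have hrb : pvRunsB (x :: r) true 1 = pvRunsB r false 2 := by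
        simp [pvRunsB, h]
      rw [hrb, pvRunsB_two, hw]
      have : ¬ (1 = r.length + 1 + 1) := by omega
      simp only [List.length_cons, this, if_false]
      simp [pvForA, h]

-- ===== VERDICT =====
theorem pos_to_neg_to_pos_spec : Claim_equal_pos_to_neg_to_pos := by
  intro s _ hpre
  cases s with
  | nil => exact absurd rfl hpre
  | cons h t =>
    unfold Spec_pos_to_neg_to_pos pos_to_neg_to_pos pos_to_neg_to_pos_alt
    by_cases hh : h.2.2.2 ≥ 0
    · have hlt : ¬ (h.2.2.2 < 0) := by omega
      simp only [hh, not_true, if_false, hlt]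
      have hge : 1 ≤ pvWhileA t 1 := pvWhileA_ge t 1
      have hdrop : (h :: t).drop (pvWhileA t 1) = t.drop (pvWhileA t 1 - 1) := by
        obtain ⟨m, hm⟩ : ∃ m, pvWhileA t 1 = m + 1 := ⟨pvWhileA t 1 - 1, by omega⟩
        simp [hm]
      rw [← core t]
      simp only [List.length_cons, hdrop]
    · have hlt : h.2.2.2 < 0 := by omega
      simp [hh, hlt]
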